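-- pv_equiv track=rewrite | github.com/ns-linda/my_code | frequently_asked/pythonProject9_1/difference.py | dup
-- ===== SOURCE A (Python) =====
-- def dup(li3):
--     dup={}
--     count = 1
--     for i in li3:
--         if i in dup:
--             dup[i] = count + 1
--         else:
--             dup[i] = count
--     return dup
-- ===== SOURCE B (Python) =====
-- def dup(li3):
--     # Sort-then-scan: a sorted copy puts equal elements next to each other,
--     # so the duplicated values are exactly the adjacent equal pairs; then
--     # classify the distinct elements in first-appearance order.
--     s = sorted(li3)
--     dups = {b for a, b in zip(s, s[1:]) if a == b}
--     return {x: 2 if x in dups else 1 for x in dict.fromkeys(li3)}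
-- ===== Notes on version B (the rewrite author's own statement) =====
-- stated objective: alternative
-- what changed: B replaces A's single dict-marking pass by a sort-then-scan algorithm: it sorts a copy, collects the duplicated values as the adjacent equal pairs of the sorted list, and then classifies the distinct elements (in first-appearance order) against that set; it trades A's O(n) hashing pass for an O(n log n) comparison sort.
import Mathlib
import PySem

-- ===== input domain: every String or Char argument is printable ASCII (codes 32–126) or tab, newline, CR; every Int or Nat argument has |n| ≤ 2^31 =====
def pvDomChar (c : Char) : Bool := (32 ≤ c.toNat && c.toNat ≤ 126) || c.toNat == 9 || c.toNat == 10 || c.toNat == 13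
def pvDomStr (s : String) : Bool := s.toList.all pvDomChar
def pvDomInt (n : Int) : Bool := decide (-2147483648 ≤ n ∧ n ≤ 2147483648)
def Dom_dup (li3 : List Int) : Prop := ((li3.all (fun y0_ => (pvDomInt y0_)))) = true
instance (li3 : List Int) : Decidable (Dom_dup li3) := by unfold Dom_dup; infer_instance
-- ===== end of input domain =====

-- B finds duplicates by sorting a copy and scanning adjacent equal pairs, then classifies the distinct elements in first-appearance order, instead of A's iterative dict-marking pass; alternative algorithm, not claimed faster.


-- ===== PORT A =====
-- for i in li3: if i in dup: dup[i] = count + 1 else: dup[i] = count   (count = 1 throughout)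
def dup (li3 : List Int) : List (Int × Int) :=
  (li3.foldl (fun d i =>
      if d.contains i then d.insert i (1 + 1) else d.insert i 1)
    (PySem.Dict.empty : PySem.Dict Int Int)).items

-- ===== PORT B =====
-- s = sorted(li3); dups = {b for a, b in zip(s, s[1:]) if a == b};
-- {x: 2 if x in dups else 1 for x in dict.fromkeys(li3)}
def dup_alt (li3 : List Int) : List (Int × Int) :=
  let s := PySem.List.sorted li3 (fun x => x) false
  let dups := PySem.Set.ofList
    (((s.zip (PySem.List.slice s (some 1) none)).filter (fun p => p.1 == p.2)).map (fun p => p.2))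
  ((PySem.List.dedup li3).foldl
      (fun d x => d.insert x (if dups.contains x then (2 : Int) else 1))
      (PySem.Dict.empty : PySem.Dict Int Int)).items

-- ===== PRECONDITION & SPEC =====
def Spec_dup (li3 : List Int) (out : List (Int × Int)) : Prop := out = dup_alt li3
instance (li3 : List Int) (out : List (Int × Int)) : Decidable (Spec_dup li3 out) := by unfold Spec_dup; infer_instance

-- ===== CLAIM (what is proved, stated in full; the proofs are below) =====
def Claim_equal_dup : Prop := ∀ (li3 : List Int), Dom_dup li3 → Spec_dup li3 (dup li3)

-- ===== LEMMAS AND PROOFS =====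

-- A's loop body, written with the branch inside the insert
theorem dup_step_eq :
    (fun (d : PySem.Dict Int Int) (i : Int) =>
        if d.contains i then d.insert i (1 + 1) else d.insert i 1)
    = (fun (d : PySem.Dict Int Int) (i : Int) =>
        d.insert i (if d.contains i then 2 else 1)) := by
  funext d i
  by_cases h : d.contains i <;> simp [h]

-- characterisation of A's dict lookup after the whole loop
theorem dup_foldl_get? (l : List Int) (k : Int) :
    ((l.foldl (fun d i => d.insert i (if d.contains i then 2 else 1))
        (PySem.Dict.empty : PySem.Dict Int Int)).get? k)
    = if l.count k = 0 then none else some (if l.count k = 1 then 1 else 2) := by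
  induction l using List.reverseRecOn with
  | nil => simp [PySem.Dict.get?_empty]
  | append_singleton l x ih =>
    rw [List.foldl_append]
    simp only [List.foldl_cons, List.foldl_nil]
    rw [PySem.Dict.get?_insert]
    by_cases hk : k = x
    · subst hk
      rw [PySem.Dict.contains_eq_isSome_get?, ih]
      simp [List.count_append]
    · rw [if_neg hk, ih]
      have hxk : ¬ x = k := fun h => hk h.symm
      simp [List.count_append, hxk]

-- both ports equal this canonical form: distinct elements in first-appearance
-- order, each tagged 1 iff it occurs exactly once
theorem dup_items_eq (li3 : List Int) :
    dup li3 = (PySem.Set.ofList li3).map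
      (fun k => (k, if li3.count k = 1 then (1 : Int) else 2)) := by
  unfold dup
  rw [dup_step_eq]
  have hkeys : ((li3.foldl (fun d i => d.insert i (if d.contains i then 2 else 1))
      (PySem.Dict.empty : PySem.Dict Int Int)).keys) = PySem.Set.ofList li3 := by
    rw [PySem.Dict.keys_foldl_insert]
    simp [PySem.Dict.keys_empty, PySem.Set.update_nil_left]
  have hnd : ((li3.foldl (fun d i => d.insert i (if d.contains i then 2 else 1))
      (PySem.Dict.empty : PySem.Dict Int Int)).keys).Nodup := by
    rw [hkeys]; exact PySem.Set.nodup_ofList li3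
  rw [PySem.Dict.items_eq_map_keys _ hnd 0, hkeys]
  apply List.map_congr_left
  intro k hk
  have hmem : k ∈ li3 := (PySem.Set.mem_ofList li3 k).mp hk
  have hc : li3.count k ≠ 0 := by
    simpa [List.count_eq_zero] using hmem
  rw [PySem.Dict.getD_eq_get?_getD, dup_foldl_get?, if_neg hc]
  rfl

-- the adjacent-equal scan only produces elements of the list
theorem adjDups_subset (s : List Int) (x : Int)
    (hx : x ∈ ((s.zip s.tail).filter (fun p => p.1 == p.2)).map (fun p => p.2)) :
    x ∈ s := by
  obtain ⟨p, hp, rfl⟩ := List.mem_map.mp hx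
  exact List.mem_of_mem_tail (List.of_mem_zip (List.mem_filter.mp hp).1).2

-- on a sorted list, the adjacent-equal pairs capture exactly the duplicated values
theorem adjDups_mem (s : List Int) (hs : s.Pairwise (· ≤ ·)) (x : Int) :
    (x ∈ ((s.zip s.tail).filter (fun p => p.1 == p.2)).map (fun p => p.2))
      ↔ 1 < s.count x := by
  induction s with
  | nil => simp
  | cons a t ih =>
    cases t with
    | nil =>
      simp [List.count_cons]
      split <;> omega
    | cons b u =>
      obtain ⟨hfor, hs'⟩ := List.pairwise_cons.mp hs
      have ihx := ih hs'
      by_cases hab : a = b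
      · subst hab
        by_cases hxa : x = a
        · subst hxa
          simp
        · have hax : ¬ a = x := fun h => hxa h.symm
          simp only [List.tail_cons, List.zip_cons_cons, List.filter_cons] at ihx ⊢
          simp only [beq_self_eq_true, if_pos, List.map_cons, List.mem_cons]
          rw [List.count_cons]
          simp [hxa, hax, ihx]
      · have hlt : ∀ y ∈ b :: u, a < y := by
          intro y hy
          rcases List.mem_cons.mp hy with rfl | hyu
          · exact lt_of_le_of_ne (hfor y (List.mem_cons_self)) hab
          · exact lt_of_lt_of_le
              (lt_of_le_of_ne (hfor b (List.mem_cons_self)) hab)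
              ((List.pairwise_cons.mp hs').1 y hyu)
        have habeq : ((a, b).1 == (a, b).2) = false := by
          simpa using hab
        simp only [List.tail_cons, List.zip_cons_cons, List.filter_cons, habeq,
          Bool.false_eq_true, reduceIte] at ihx ⊢
        by_cases hxa : x = a
        · subst hxa
          have hnot : x ∉ b :: u := fun h => lt_irrefl x (hlt x h)
          have hcz : (b :: u).count x = 0 := List.count_eq_zero.mpr hnot
          constructor
          · intro hmem
            exact absurd (adjDups_subset (b :: u) x hmem) hnot
          · intro hc
            rw [List.count_cons_self, hcz] at hc
            omega
        · have hax : ¬ a = x := fun h => hxa h.symm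
          rw [ihx]
          simp [List.count_cons, hax]

theorem dup_alt_items_eq (li3 : List Int) :
    dup_alt li3 = (PySem.Set.ofList li3).map
      (fun k => (k, if li3.count k = 1 then (1 : Int) else 2)) := by
  unfold dup_alt
  dsimp only
  rw [PySem.List.slice_from_one]
  rw [PySem.Dict.items_foldl_insert_fresh (PySem.List.dedup li3) (fun x => x) _
      (PySem.Dict.empty : PySem.Dict Int Int)
      (by intro a _; simp [PySem.Dict.contains_empty])
      (by exact (List.map_id _ ▸ PySem.List.nodup_dedup li3 : ((PySem.List.dedup li3).map (fun x => x)).Nodup))]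
  rw [show (PySem.Dict.empty : PySem.Dict Int Int).items = [] from rfl, List.nil_append]
  rw [PySem.List.dedup_eq_ofList]
  apply List.map_congr_left
  intro k hk
  have hmem : k ∈ li3 := (PySem.Set.mem_ofList li3 k).mp hk
  have hcpos : li3.count k ≠ 0 := by simpa [List.count_eq_zero] using hmem
  have hcount : (PySem.List.sorted li3 (fun x => x) false).count k = li3.count k :=
    (PySem.List.sorted_perm li3 (fun x => x) false).count_eq k
  have hcont : (PySem.Set.ofList
      ((((PySem.List.sorted li3 (fun x => x) false).zip
          (PySem.List.sorted li3 (fun x => x) false).tail).filter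
            (fun p => p.1 == p.2)).map (fun p => p.2))).contains k
      = decide (1 < li3.count k) := by
    simp only [PySem.Set.contains]
    rw [show ∀ a b : Bool, a = b ↔ (a = true ↔ b = true) from by decide]
    simp only [decide_eq_true_eq, List.contains_iff_mem]
    rw [PySem.Set.mem_ofList,
      adjDups_mem _ (PySem.List.sorted_pairwise li3 (fun x => x)) k, hcount]
  rw [hcont]
  by_cases h1 : li3.count k = 1
  · simp [h1]
  · have : 1 < li3.count k := by omega
    simp [h1, this]

-- ===== VERDICT (by name: the statement is the Claim_ definition above) =====
theorem dup_spec : Claim_equal_dup := by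
  intro li3 _
  unfold Spec_dup
  rw [dup_items_eq, dup_alt_items_eq]
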